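-- pv_equiv track=rewrite | github.com/keggsmurph21/tourney-beast | scheduling/program files/schedule-gui.py | fixDoubleSchedule
-- ===== SOURCE A (Python) =====
-- def fixDoubleSchedule(team, grid):
--     listOppNames = []
--     listOppIndex = []
--     for row in grid:
--         if row.count(team):
--             teamRow = grid.index(row)
--             oppRow = teamRow - 1 + 2 * (grid.index(row)%2)
--             teamCol = row.index(team)
--             opponent = grid[oppRow][teamCol]
--             listOppNames.append(opponent)
--             listOppIndex.append([teamRow,oppRow,teamCol])
--
--     listOppNames = listOppNames[::-1]
--     listOppIndex = listOppIndex[::-1]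
--
--     for o in range(len(listOppNames)):
--         if listOppNames[o + 1:].count(listOppNames[o]):
--             delTeam = listOppIndex[o][0]
--             delOpp = listOppIndex[o][1]
--             delCol = listOppIndex[o][2]
--
--             grid[delTeam][delCol] = "No game -- Error fixed"
--             grid[delOpp][delCol] = "No game -- Error fixed"
--
--     return grid
-- ===== SOURCE B (Python) =====
-- def fixDoubleSchedule(team, grid):
--     # One forward pass collects (opponent, teamRow, oppRow, teamCol); a second
--     # forward pass with a seen-set marks every occurrence after the first.
--     occurrences = []
--     for row in grid:
--         if team in row:
--             teamRow = grid.index(row)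
--             oppRow = teamRow - 1 + 2 * (teamRow % 2)
--             teamCol = row.index(team)
--             occurrences.append((grid[oppRow][teamCol], teamRow, oppRow, teamCol))
--     seen = set()
--     for opponent, teamRow, oppRow, teamCol in occurrences:
--         if opponent in seen:
--             grid[teamRow][teamCol] = "No game -- Error fixed"
--             grid[oppRow][teamCol] = "No game -- Error fixed"
--         else:
--             seen.add(opponent)
--     return grid
-- ===== Notes on version B (the rewrite author's own statement) =====
-- stated objective: simpler
-- what changed: A reverses the collected opponent lists and detects duplicates with a quadratic suffix-slice .count() over the reversed list; B keeps the collection in forward order and marks every occurrence after the first with a single forward pass over a seen-set, so the reversal and the inner slice-and-count scan disappear.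
import Mathlib
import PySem

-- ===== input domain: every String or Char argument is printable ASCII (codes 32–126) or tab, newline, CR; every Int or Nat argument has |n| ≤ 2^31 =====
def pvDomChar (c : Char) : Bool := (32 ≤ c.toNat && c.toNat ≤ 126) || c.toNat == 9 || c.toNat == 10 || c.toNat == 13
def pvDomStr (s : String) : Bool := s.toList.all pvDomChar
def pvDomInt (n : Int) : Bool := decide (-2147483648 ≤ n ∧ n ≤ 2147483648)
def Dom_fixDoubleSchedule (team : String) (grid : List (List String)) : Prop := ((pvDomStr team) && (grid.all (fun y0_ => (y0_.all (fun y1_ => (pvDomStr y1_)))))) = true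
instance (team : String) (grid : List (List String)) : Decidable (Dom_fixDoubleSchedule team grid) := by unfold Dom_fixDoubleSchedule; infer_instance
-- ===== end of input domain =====

-- B replaces A's reverse-the-lists-and-count-the-suffix duplicate detection by a single
-- forward pass over a seen-set (objective: simpler).  Python A mutates `grid` in place and
-- returns it; the equivalence proved here is about the RETURN value (B performs the same
-- in-place marking in Python).

def pvMark : String := "No game -- Error fixed"

-- Exact port of the Python statement `g[i][j] = pvMark`: read the row object, set the cell,
-- the row stays at index i.  On an out-of-range index (where Python raises IndexError —
-- excluded by Pre_) the grid is left unchanged.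
def pvAssign (g : List (List String)) (i j : Int) : List (List String) :=
  PySem.List.pySetD g i (PySem.List.pySetD (PySem.List.pyGetD g i []) j pvMark)

-- ===== PORT A =====
def fixDoubleSchedule (team : String) (grid : List (List String)) : List (List String) :=
  let st := grid.foldl (fun (acc : List String × List (Int × Int × Int)) row =>
      if PySem.List.count row team ≠ 0 then
        let teamRow : Int := ((PySem.List.index? grid row).getD 0 : Nat)
        let oppRow : Int := teamRow - 1 + 2 * PySem.Int.mod teamRow 2
        let teamCol : Int := ((PySem.List.index? row team).getD 0 : Nat)
        let opponent : String := PySem.List.pyGetD (PySem.List.pyGetD grid oppRow []) teamCol ""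
        (acc.1 ++ [opponent], acc.2 ++ [(teamRow, oppRow, teamCol)])
      else acc) ([], [])
  let listOppNames := st.1.reverse
  let listOppIndex := st.2.reverse
  (PySem.List.pyRange 0 (PySem.List.len listOppNames) 1).foldl (fun g o =>
      if PySem.List.count (PySem.List.slice listOppNames (some (o + 1)) none)
           (PySem.List.pyGetD listOppNames o "") ≠ 0 then
        let delTeam := (PySem.List.pyGetD listOppIndex o ((0 : Int), (0 : Int), (0 : Int))).1
        let delOpp := (PySem.List.pyGetD listOppIndex o ((0 : Int), (0 : Int), (0 : Int))).2.1
        let delCol := (PySem.List.pyGetD listOppIndex o ((0 : Int), (0 : Int), (0 : Int))).2.2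
        pvAssign (pvAssign g delTeam delCol) delOpp delCol
      else g) grid

-- ===== PORT B =====
def fixDoubleSchedule_alt (team : String) (grid : List (List String)) : List (List String) :=
  let occurrences := grid.foldl (fun (acc : List (String × Int × Int × Int)) row =>
      if row.contains team then
        let teamRow : Int := ((PySem.List.index? grid row).getD 0 : Nat)
        let oppRow : Int := teamRow - 1 + 2 * PySem.Int.mod teamRow 2
        let teamCol : Int := ((PySem.List.index? row team).getD 0 : Nat)
        acc ++ [(PySem.List.pyGetD (PySem.List.pyGetD grid oppRow []) teamCol "", teamRow, oppRow, teamCol)]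
      else acc) []
  (occurrences.foldl (fun (st : PySem.Set String × List (List String)) p =>
      if PySem.Set.contains st.1 p.1 then
        (st.1, pvAssign (pvAssign st.2 p.2.1 p.2.2.2) p.2.2.1 p.2.2.2)
      else
        (PySem.Set.add st.1 p.1, st.2)) (PySem.Set.empty, grid)).2

-- ===== PRECONDITION & SPEC =====
-- Pre_ excludes exactly the inputs on which Python A raises IndexError: a matching row whose
-- opponent row (teamRow-1+2*(teamRow%2), Python negative indexing allowed) or the team column
-- inside that opponent row does not exist.
def Pre_fixDoubleSchedule (team : String) (grid : List (List String)) : Prop :=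
  ∀ r ∈ grid, team ∈ r →
    ((PySem.List.pyGet? grid
        ((((PySem.List.index? grid r).getD 0 : Nat) : Int) - 1
          + 2 * PySem.Int.mod (((PySem.List.index? grid r).getD 0 : Nat) : Int) 2)).bind
      (fun orow => PySem.List.pyGet? orow (((PySem.List.index? r team).getD 0 : Nat) : Int))) ≠ none

instance (team : String) (grid : List (List String)) : Decidable (Pre_fixDoubleSchedule team grid) := by
  unfold Pre_fixDoubleSchedule; infer_instance

def pvWitness_fixDoubleSchedule : String × List (List String) :=
  ("T", [["T", "a"], ["opp", "b"]])

def Spec_fixDoubleSchedule (team : String) (grid : List (List String)) (out : List (List String)) : Prop := out = fixDoubleSchedule_alt team grid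
instance (team : String) (grid : List (List String)) (out : List (List String)) : Decidable (Spec_fixDoubleSchedule team grid out) := by unfold Spec_fixDoubleSchedule; infer_instance

-- ===== CLAIM (what is proved, stated in full; the proofs are below) =====
def Claim_equal_fixDoubleSchedule : Prop := ∀ (team : String) (grid : List (List String)), Dom_fixDoubleSchedule team grid → Pre_fixDoubleSchedule team grid → Spec_fixDoubleSchedule team grid (fixDoubleSchedule team grid)

-- ===== LEMMAS AND PROOFS =====

-- the double write both ports perform for one duplicate occurrence
def pvW (g : List (List String)) (tr : Int × Int × Int) : List (List String) :=
  pvAssign (pvAssign g tr.1 tr.2.2) tr.2.1 tr.2.2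

-- selection of the marked triples, read off A's reversed list: keep tr when its name
-- occurs later in the list (or in the context ctx)
def pvSelR (l : List (String × Int × Int × Int)) (ctx : List String) : List (Int × Int × Int) :=
  match l with
  | [] => []
  | p :: rest => (if p.1 ∈ rest.map Prod.fst ++ ctx then [p.2] else []) ++ pvSelR rest ctx

-- selection of the marked triples, read off B's forward pass: keep tr when its name was seen
def pvSelB (seen : List String) (l : List (String × Int × Int × Int)) : List (Int × Int × Int) :=
  match l with
  | [] => []
  | p :: rest => if p.1 ∈ seen then p.2 :: pvSelB seen rest else pvSelB (PySem.Set.add seen p.1) rest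

theorem pv_idx_lt {n : Nat} {i : Int} {r : Nat} (h : PySem.List.pyIdx? n i = some r) : r < n := by
  unfold PySem.List.pyIdx? at h
  split_ifs at h with h1 h2 h3 <;> simp_all <;> omega

theorem pv_setD_none {α : Type} {xs : List α} {i : Int} (v : α)
    (h : PySem.List.pyIdx? xs.length i = none) : PySem.List.pySetD xs i v = xs := by
  simp [PySem.List.pySetD, PySem.List.pySet?, h]

theorem pv_setD_some {α : Type} {xs : List α} {i : Int} {k : Nat} (v : α)
    (h : PySem.List.pyIdx? xs.length i = some k) : PySem.List.pySetD xs i v = xs.set k v := by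
  simp [PySem.List.pySetD, PySem.List.pySet?, h]

theorem pv_getD_some {α : Type} {xs : List α} {i : Int} {k : Nat} (d : α)
    (h : PySem.List.pyIdx? xs.length i = some k) : PySem.List.pyGetD xs i d = xs.getD k d := by
  simp [PySem.List.pyGetD, PySem.List.pyGet?, h, List.getD_eq_getElem?_getD]

theorem pv_set_const_comm {α : Type} (l : List α) (a b : Nat) (v : α) :
    (l.set a v).set b v = (l.set b v).set a v := by
  by_cases h : a = b
  · subst h; rfl
  · exact List.set_comm v v h

theorem pv_rowset_comm (row : List String) (c c' : Int) (v : String) :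
    PySem.List.pySetD (PySem.List.pySetD row c v) c' v
      = PySem.List.pySetD (PySem.List.pySetD row c' v) c v := by
  cases hc : PySem.List.pyIdx? row.length c with
  | none =>
      rw [pv_setD_none _ hc]
      cases hc' : PySem.List.pyIdx? row.length c' with
      | none => rw [pv_setD_none _ hc', pv_setD_none _ hc]
      | some k' =>
          rw [pv_setD_some _ hc']
          rw [pv_setD_none (xs := row.set k' v) _ (by rw [List.length_set]; exact hc)]
  | some k =>
      rw [pv_setD_some _ hc]
      cases hc' : PySem.List.pyIdx? row.length c' with
      | none =>
          rw [pv_setD_none (xs := row.set k v) _ (by rw [List.length_set]; exact hc'),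
              pv_setD_none _ hc', pv_setD_some _ hc]
      | some k' =>
          rw [pv_setD_some (xs := row.set k v) _ (by rw [List.length_set]; exact hc'),
              pv_setD_some _ hc', pv_setD_some (xs := row.set k' v) _ (by rw [List.length_set]; exact hc)]
          exact pv_set_const_comm _ _ _ _

theorem pv_getD_set_ne {g : List (List String)} {r j : Nat} (x d : List String) (h : j ≠ r) :
    (g.set r x).getD j d = g.getD j d := by
  simp [List.getD_eq_getElem?_getD, h.symm]

theorem pv_getD_set_self {g : List (List String)} {r : Nat} (x d : List String) (h : r < g.length) :
    (g.set r x).getD r d = x := by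
  simp [List.getD_eq_getElem?_getD, h]

theorem pvAssign_none {g : List (List String)} {i : Int} (c : Int)
    (h : PySem.List.pyIdx? g.length i = none) : pvAssign g i c = g := by
  unfold pvAssign; exact pv_setD_none _ h

theorem pvAssign_some {g : List (List String)} {i : Int} {r : Nat} (c : Int)
    (h : PySem.List.pyIdx? g.length i = some r) :
    pvAssign g i c = g.set r (PySem.List.pySetD (g.getD r []) c pvMark) := by
  unfold pvAssign; rw [pv_getD_some _ h, pv_setD_some _ h]

theorem pvAssign_comm (g : List (List String)) (i c i' c' : Int) :
    pvAssign (pvAssign g i c) i' c' = pvAssign (pvAssign g i' c') i c := by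
  cases h : PySem.List.pyIdx? g.length i with
  | none =>
      rw [pvAssign_none c h]
      cases h' : PySem.List.pyIdx? g.length i' with
      | none => rw [pvAssign_none c' h', pvAssign_none c h]
      | some r' =>
          rw [pvAssign_some c' h']
          rw [pvAssign_none c (by rw [List.length_set]; exact h)]
  | some r =>
      rw [pvAssign_some c h]
      cases h' : PySem.List.pyIdx? g.length i' with
      | none =>
          rw [pvAssign_none c' (by rw [List.length_set]; exact h'),
              pvAssign_none c' h', pvAssign_some c h]
      | some r' =>
          have hr : r < g.length := pv_idx_lt h
          by_cases hrr : r = r'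
          · subst hrr
            rw [pvAssign_some c' h', pvAssign_some (g := g.set r _) c' (by rw [List.length_set]; exact h'),
                pvAssign_some (g := g.set r _) c (by rw [List.length_set]; exact h)]
            rw [pv_getD_set_self _ _ hr, pv_getD_set_self _ _ hr, List.set_set, List.set_set,
                pv_rowset_comm]
          · rw [pvAssign_some c' h', pvAssign_some (g := g.set r _) c' (by rw [List.length_set]; exact h'),
                pvAssign_some (g := g.set r' _) c (by rw [List.length_set]; exact h)]
            rw [pv_getD_set_ne _ _ (Ne.symm hrr), pv_getD_set_ne _ _ hrr,
                List.set_comm _ _ hrr]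

theorem pvW_comm (g : List (List String)) (a b : Int × Int × Int) :
    pvW (pvW g a) b = pvW (pvW g b) a := by
  unfold pvW
  rw [pvAssign_comm _ a.2.1 a.2.2 b.1 b.2.2, pvAssign_comm _ a.1 a.2.2 b.1 b.2.2,
      pvAssign_comm _ a.2.1 a.2.2 b.2.1 b.2.2, pvAssign_comm _ a.1 a.2.2 b.2.1 b.2.2]

theorem pv_foldl_W_out (l : List (Int × Int × Int)) (g : List (List String)) (a : Int × Int × Int) :
    l.foldl pvW (pvW g a) = pvW (l.foldl pvW g) a := by
  induction l generalizing g with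
  | nil => rfl
  | cons x l ih => simp only [List.foldl_cons]; rw [pvW_comm, ih]

theorem pv_foldl_W_reverse (l : List (Int × Int × Int)) (g : List (List String)) :
    l.reverse.foldl pvW g = l.foldl pvW g := by
  induction l generalizing g with
  | nil => rfl
  | cons x l ih =>
      simp only [List.reverse_cons, List.foldl_append, List.foldl_cons, List.foldl_nil]
      rw [ih, ← pv_foldl_W_out]

theorem pv_foldl_if_filterMap {β γ : Type} (p : Nat → Prop) [DecidablePred p]
    (t : Nat → γ) (W : β → γ → β) (l : List Nat) (g : β) :
    l.foldl (fun g k => if p k then W g (t k) else g) g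
      = (l.filterMap (fun k => if p k then some (t k) else none)).foldl W g := by
  induction l generalizing g with
  | nil => rfl
  | cons x l ih =>
      simp only [List.foldl_cons, List.filterMap_cons]
      by_cases h : p x <;> simp [h, ih]

theorem pv_rangeSel (M : List (String × Int × Int × Int)) :
    (List.range M.length).filterMap (fun k =>
        if (M.map Prod.fst).getD k "" ∈ (M.map Prod.fst).drop (k + 1)
        then some ((M.map Prod.snd).getD k ((0 : Int), (0 : Int), (0 : Int))) else none)
      = pvSelR M [] := by
  induction M with
  | nil => rfl
  | cons p rest ih =>
      simp only [List.length_cons, List.range_succ_eq_map, List.filterMap_cons,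
        List.filterMap_map, Function.comp_def, Nat.succ_eq_add_one, List.map_cons,
        List.getD_cons_succ, List.getD_cons_zero, List.drop_succ_cons, List.drop_zero]
      by_cases h : p.1 ∈ rest.map Prod.fst
      · simp only [if_pos h]
        rw [ih]
        simp [pvSelR, h]
      · simp only [if_neg h]
        rw [ih]
        simp [pvSelR, h]

theorem pvSelR_append (ys : List (String × Int × Int × Int)) (p : String × Int × Int × Int)
    (ctx : List String) :
    pvSelR (ys ++ [p]) ctx = pvSelR ys (p.1 :: ctx) ++ (if p.1 ∈ ctx then [p.2] else []) := by
  induction ys with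
  | nil => simp [pvSelR]
  | cons q ys ih =>
      simp only [List.cons_append, pvSelR, List.map_append, List.map_cons, List.map_nil, ih,
        List.append_assoc, List.nil_append]

theorem pvSelR_reverse (l : List (String × Int × Int × Int)) (seen ctx : List String)
    (h : ∀ x, x ∈ seen ↔ x ∈ ctx) :
    pvSelR l.reverse ctx = (pvSelB seen l).reverse := by
  induction l generalizing seen ctx with
  | nil => rfl
  | cons p rest ih =>
      simp only [List.reverse_cons, pvSelR_append, pvSelB]
      by_cases hp : p.1 ∈ seen
      · have hc : p.1 ∈ ctx := (h p.1).mp hp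
        rw [if_pos hp, if_pos hc, List.reverse_cons]
        congr 1
        exact ih seen (p.1 :: ctx) (fun x => by
          constructor
          · intro hx; exact List.mem_cons_of_mem _ ((h x).mp hx)
          · intro hx
            rcases List.mem_cons.mp hx with rfl | hx
            · exact hp
            · exact (h x).mpr hx)
      · have hc : p.1 ∉ ctx := fun hc => hp ((h p.1).mpr hc)
        rw [if_neg hp, if_neg hc, List.append_nil]
        exact ih (PySem.Set.add seen p.1) (p.1 :: ctx) (fun x => by
          simp only [List.mem_cons]
          constructor
          · intro hx
            rcases (PySem.Set.mem_add seen p.1 x).mp hx with h1 | h1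
            · right; exact (h x).mp h1
            · left; exact h1
          · intro hx
            rcases hx with rfl | hx
            · exact (PySem.Set.mem_add seen _ _).mpr (Or.inr rfl)
            · exact (PySem.Set.mem_add seen p.1 x).mpr (Or.inl ((h x).mpr hx)))


-- Phase 1 of both ports collects the same data: A as a pair of lists, B as one list of tuples.
theorem pv_phase1 (team : String) (grid : List (List String))
    (rows : List (List String)) (acc : List (String × Int × Int × Int)) :
    rows.foldl (fun (acc : List String × List (Int × Int × Int)) row =>
      if PySem.List.count row team ≠ 0 then
        let teamRow : Int := ((PySem.List.index? grid row).getD 0 : Nat)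
        let oppRow : Int := teamRow - 1 + 2 * PySem.Int.mod teamRow 2
        let teamCol : Int := ((PySem.List.index? row team).getD 0 : Nat)
        let opponent : String := PySem.List.pyGetD (PySem.List.pyGetD grid oppRow []) teamCol ""
        (acc.1 ++ [opponent], acc.2 ++ [(teamRow, oppRow, teamCol)])
      else acc) (acc.map Prod.fst, acc.map Prod.snd)
    = ((rows.foldl (fun (acc : List (String × Int × Int × Int)) row =>
        if row.contains team then
          let teamRow : Int := ((PySem.List.index? grid row).getD 0 : Nat)
          let oppRow : Int := teamRow - 1 + 2 * PySem.Int.mod teamRow 2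
          let teamCol : Int := ((PySem.List.index? row team).getD 0 : Nat)
          acc ++ [(PySem.List.pyGetD (PySem.List.pyGetD grid oppRow []) teamCol "", teamRow, oppRow, teamCol)]
        else acc) acc).map Prod.fst,
       (rows.foldl (fun (acc : List (String × Int × Int × Int)) row =>
        if row.contains team then
          let teamRow : Int := ((PySem.List.index? grid row).getD 0 : Nat)
          let oppRow : Int := teamRow - 1 + 2 * PySem.Int.mod teamRow 2
          let teamCol : Int := ((PySem.List.index? row team).getD 0 : Nat)
          acc ++ [(PySem.List.pyGetD (PySem.List.pyGetD grid oppRow []) teamCol "", teamRow, oppRow, teamCol)]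
        else acc) acc).map Prod.snd) := by
  induction rows generalizing acc with
  | nil => rfl
  | cons row rows ih =>
      simp only [List.foldl_cons]
      by_cases hm : team ∈ row
      · have hc : PySem.List.count row team ≠ 0 := by
          rw [PySem.List.count_eq]
          simpa [List.count_eq_zero] using hm
        rw [if_pos hc, if_pos (by simpa using hm)]
        have := ih (acc ++ [(PySem.List.pyGetD (PySem.List.pyGetD grid
            ((((PySem.List.index? grid row).getD 0 : Nat) : Int) - 1
              + 2 * PySem.Int.mod (((PySem.List.index? grid row).getD 0 : Nat) : Int) 2) [])
            (((PySem.List.index? row team).getD 0 : Nat) : Int) "",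
            (((PySem.List.index? grid row).getD 0 : Nat) : Int),
            (((PySem.List.index? grid row).getD 0 : Nat) : Int) - 1
              + 2 * PySem.Int.mod (((PySem.List.index? grid row).getD 0 : Nat) : Int) 2,
            (((PySem.List.index? row team).getD 0 : Nat) : Int))])
        simpa [List.map_append] using this
      · have hc : ¬ PySem.List.count row team ≠ 0 := by
          rw [PySem.List.count_eq]
          simp [List.count_eq_zero, hm]
        rw [if_neg hc, if_neg (by simpa using hm)]
        exact ih acc

-- A's second loop, over the reversed collection M, is the fold of pvW over pvSelR M [].
theorem pv_phase2A (M : List (String × Int × Int × Int)) (g : List (List String)) :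
    (PySem.List.pyRange 0 (PySem.List.len (M.map Prod.fst)) 1).foldl (fun g o =>
        if PySem.List.count (PySem.List.slice (M.map Prod.fst) (some (o + 1)) none)
             (PySem.List.pyGetD (M.map Prod.fst) o "") ≠ 0 then
          pvAssign (pvAssign g
              (PySem.List.pyGetD (M.map Prod.snd) o ((0 : Int), (0 : Int), (0 : Int))).1
              (PySem.List.pyGetD (M.map Prod.snd) o ((0 : Int), (0 : Int), (0 : Int))).2.2)
            (PySem.List.pyGetD (M.map Prod.snd) o ((0 : Int), (0 : Int), (0 : Int))).2.1
            (PySem.List.pyGetD (M.map Prod.snd) o ((0 : Int), (0 : Int), (0 : Int))).2.2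
        else g) g
      = (pvSelR M []).foldl pvW g := by
  have hlen : PySem.List.len (M.map Prod.fst) = (M.length : Int) := by
    simp [PySem.List.len_eq]
  rw [hlen, PySem.List.pyRange_one, List.foldl_map,
      show ((M.length : Int) - 0).toNat = M.length by omega]
  calc _ = (List.range M.length).foldl (fun g k =>
          if (M.map Prod.fst).getD k "" ∈ (M.map Prod.fst).drop (k + 1) then
            pvW g ((M.map Prod.snd).getD k ((0 : Int), (0 : Int), (0 : Int))) else g) g := by
        refine List.foldl_ext _ _ g (fun g' k _ => ?_)
        rw [zero_add, show ((k : Int) + 1) = (((k + 1 : Nat)) : Int) by push_cast; ring,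
            PySem.List.slice_from_natCast, PySem.List.pyGetD_natCast,
            PySem.List.pyGetD_natCast, PySem.List.count_eq]
        by_cases h : (M.map Prod.fst).getD k "" ∈ (M.map Prod.fst).drop (k + 1)
        · rw [if_pos (by simpa [List.count_eq_zero] using h), if_pos h]; rfl
        · rw [if_neg (by simpa [List.count_eq_zero] using h), if_neg h]
    _ = (pvSelR M []).foldl pvW g := by
        rw [pv_foldl_if_filterMap (fun k => (M.map Prod.fst).getD k "" ∈ (M.map Prod.fst).drop (k + 1))
              (fun k => (M.map Prod.snd).getD k ((0 : Int), (0 : Int), (0 : Int))) pvW,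
            pv_rangeSel]

-- B's second loop: the grid component of the fold is the fold of pvW over pvSelB seen l.
theorem pv_phase2B (l : List (String × Int × Int × Int)) (seen : PySem.Set String)
    (g : List (List String)) :
    (l.foldl (fun (st : PySem.Set String × List (List String)) p =>
      if PySem.Set.contains st.1 p.1 then
        (st.1, pvAssign (pvAssign st.2 p.2.1 p.2.2.2) p.2.2.1 p.2.2.2)
      else
        (PySem.Set.add st.1 p.1, st.2)) (seen, g)).2
      = (pvSelB seen l).foldl pvW g := by
  induction l generalizing seen g with
  | nil => rfl
  | cons p rest ih =>
      simp only [List.foldl_cons, pvSelB]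
      by_cases hp : p.1 ∈ seen
      · rw [if_pos (PySem.Set.contains_iff seen p.1 |>.mpr hp), if_pos hp]
        exact ih seen _
      · rw [if_neg (by simpa [PySem.Set.contains_iff] using hp), if_neg hp]
        exact ih _ g

theorem pv_main (team : String) (grid : List (List String)) :
    fixDoubleSchedule team grid = fixDoubleSchedule_alt team grid := by
  unfold fixDoubleSchedule fixDoubleSchedule_alt
  simp only []
  rw [show (([] : List String), ([] : List (Int × Int × Int)))
        = (([] : List (String × Int × Int × Int)).map Prod.fst,
           ([] : List (String × Int × Int × Int)).map Prod.snd) from rfl]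
  rw [pv_phase1 team grid grid []]
  rw [← List.map_reverse, ← List.map_reverse]
  rw [pv_phase2A]
  rw [pvSelR_reverse _ ([] : List String) [] (fun _ => Iff.rfl), pv_foldl_W_reverse]
  rw [← pv_phase2B]
  rfl
-- ===== VERDICT (by name: the statement is the Claim_ definition above) =====
theorem fixDoubleSchedule_spec : Claim_equal_fixDoubleSchedule := by
  intro team grid _ _
  unfold Spec_fixDoubleSchedule
  exact pv_main team grid
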